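-- pv_equiv track=rewrite | github.com/djjkelly/Advent-of-Code | 2023/2023_Day12_Part2.py | make_full_strings
-- ===== SOURCE A (Python) =====
-- def make_full_strings(condition_records,test_list):
--     new_list = []
--     for test_string in test_list:
--         test_index = 0
--         new_condition_records = condition_records
--         for condition_index,character in enumerate(condition_records):
--             if character == '?':
--                 new_condition_records = new_condition_records[:condition_index]+test_string[test_index] + new_condition_records[condition_index + 1:]
--                 test_index += 1
--         new_list.append(new_condition_records)
--     return new_list
-- ===== SOURCE B (Python) =====
-- def make_full_strings(condition_records, test_list):
--     # Split the template once into fixed segments; per test string just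
--     # interleave segments with the test characters (explicit indexing so a
--     # too-short test string still raises IndexError, as in the original).
--     parts = condition_records.split('?')
--     new_list = []
--     for test_string in test_list:
--         pieces = []
--         for i in range(len(parts) - 1):
--             pieces.append(parts[i])
--             pieces.append(test_string[i])
--         pieces.append(parts[-1])
--         new_list.append(''.join(pieces))
--     return new_list
-- ===== Notes on version B (the rewrite author's own statement) =====
-- stated objective: faster
-- what changed: B splits the template into its '?'-separated segments once, outside the per-test loop, and builds each output by interleaving segments with test characters in one join, instead of re-scanning the whole template and rebuilding the string by slicing for every '?' of every test string.
import Mathlib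
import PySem

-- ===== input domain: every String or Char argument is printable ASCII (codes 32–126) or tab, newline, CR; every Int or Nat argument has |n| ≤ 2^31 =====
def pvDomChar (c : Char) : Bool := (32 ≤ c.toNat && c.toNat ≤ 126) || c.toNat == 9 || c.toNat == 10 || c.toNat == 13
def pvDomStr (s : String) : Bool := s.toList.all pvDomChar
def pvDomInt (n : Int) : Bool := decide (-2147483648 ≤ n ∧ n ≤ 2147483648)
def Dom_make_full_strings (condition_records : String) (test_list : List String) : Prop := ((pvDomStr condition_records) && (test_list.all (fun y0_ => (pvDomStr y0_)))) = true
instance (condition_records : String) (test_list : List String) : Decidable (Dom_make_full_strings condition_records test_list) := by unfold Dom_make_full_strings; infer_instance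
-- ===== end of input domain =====

-- B splits the template into '?'-separated segments once and interleaves them with
-- test characters per test string, instead of re-slicing the whole string per '?'.


-- ===== PORT A =====
-- one step of A's inner loop: if the character is '?', rebuild the string by
-- slicing, advance test_index; Python raises IndexError when test_string is too
-- short (pyGet? = none) — that input is excluded by Pre_, the port keeps state.
def stepA (ts : List Char) (st : Int × List Char) (p : Int × Char) : Int × List Char :=
  if p.2 = '?' then
    match PySem.List.pyGet? ts st.1 with
    | some c =>
        (st.1 + 1,
         PySem.List.slice st.2 none (some p.1) ++ [c] ++
           PySem.List.slice st.2 (some (p.1 + 1)) none)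
    | none => st
  else st

def make_full_strings (condition_records : String) (test_list : List String) : List String :=
  test_list.foldl
    (fun new_list test_string =>
      new_list ++
        [String.ofList
          ((PySem.List.enumerate condition_records.toList 0).foldl
            (stepA test_string.toList) (0, condition_records.toList)).2])
    []

-- ===== PORT B =====
-- condition_records.split('?'), hand-ported step for step (exact: Python's
-- str.split with a one-char separator; ''.split('?') = ['']).
def splitQ : List Char → List (List Char)
  | [] => [[]]
  | c :: rest =>
    if c = '?' then [] :: splitQ rest
    else
      match splitQ rest with
      | [] => [[c]]
      | p :: ps => (c :: p) :: ps

-- the interleave loop: parts[i] then test_string[i] for each gap, final part last;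
-- pyGet? = none (test string too short) is Python's IndexError, outside Pre_.
def weave (ts : List Char) (i : Nat) : List (List Char) → List Char
  | [] => []
  | [last] => last
  | p :: q :: ps =>
      p ++ (match PySem.List.pyGet? ts (i : Int) with
            | some c => [c]
            | none => []) ++ weave ts (i + 1) (q :: ps)

def make_full_strings_alt (condition_records : String) (test_list : List String) : List String :=
  test_list.map
    (fun test_string => String.ofList (weave test_string.toList 0 (splitQ condition_records.toList)))

-- ===== PRECONDITION & SPEC =====
-- Pre_ excludes exactly the inputs where Python A raises IndexError: some test
-- string shorter than the number of '?' in the template (B raises there too).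
def Pre_make_full_strings (condition_records : String) (test_list : List String) : Prop :=
  ∀ ts ∈ test_list, condition_records.toList.count '?' ≤ ts.toList.length

instance (condition_records : String) (test_list : List String) : Decidable (Pre_make_full_strings condition_records test_list) := by unfold Pre_make_full_strings; infer_instance

def pvWitness_make_full_strings : String × List String := ("a?b?c", ["xy", "zw1"])

def Spec_make_full_strings (condition_records : String) (test_list : List String) (out : List String) : Prop := out = make_full_strings_alt condition_records test_list
instance (condition_records : String) (test_list : List String) (out : List String) : Decidable (Spec_make_full_strings condition_records test_list out) := by unfold Spec_make_full_strings; infer_instance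

-- ===== CLAIM (what is proved, stated in full; the proofs are below) =====
def Claim_equal_make_full_strings : Prop := ∀ (condition_records : String) (test_list : List String), Dom_make_full_strings condition_records test_list → Pre_make_full_strings condition_records test_list → Spec_make_full_strings condition_records test_list (make_full_strings condition_records test_list)

-- ===== LEMMAS AND PROOFS =====

-- the common characterisation: replace the k-th '?' by ts[i+k]
def fillT (ts : List Char) : List Char → Nat → List Char
  | [], _ => []
  | c :: rest, i =>
    if c = '?' then ts.getD i '?' :: fillT ts rest (i + 1)
    else c :: fillT ts rest i

theorem weave_cons_head (ts : List Char) (i : Nat) (c : Char) (p : List Char)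
    (ps : List (List Char)) :
    weave ts i ((c :: p) :: ps) = c :: weave ts i (p :: ps) := by
  cases ps with
  | nil => simp [weave]
  | cons q qs => simp [weave]

theorem splitQ_ne_nil (cs : List Char) : splitQ cs ≠ [] := by
  cases cs with
  | nil => simp [splitQ]
  | cons c rest =>
    simp only [splitQ]
    split
    · simp
    · cases hsp : splitQ rest <;> simp

theorem weave_splitQ (ts cs : List Char) (i : Nat)
    (h : i + cs.count '?' ≤ ts.length) :
    weave ts i (splitQ cs) = fillT ts cs i := by
  induction cs generalizing i with
  | nil => simp [splitQ, weave, fillT]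
  | cons c rest ih =>
    by_cases hc : c = '?'
    · subst hc
      have hi : i < ts.length := by simp [List.count_cons] at h; omega
      have hget : PySem.List.pyGet? ts (i : Int) = some ts[i] := by
        rw [PySem.List.pyGet?_natCast]
        exact List.getElem?_eq_getElem hi
      obtain ⟨q, qs, hq⟩ : ∃ q qs, splitQ rest = q :: qs := by
        cases hsp : splitQ rest with
        | nil => exact absurd hsp (splitQ_ne_nil rest)
        | cons q qs => exact ⟨q, qs, rfl⟩
      have hih := ih (i + 1) (by simp [List.count_cons] at h; omega)
      have hsq : splitQ ('?' :: rest) = [] :: q :: qs := by simp [splitQ, hq]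
      rw [hsq]
      have : weave ts i ([] :: q :: qs) = [ts[i]] ++ weave ts (i + 1) (q :: qs) := by
        simp [weave, hget]
      rw [this, ← hq, hih]
      simp [fillT, List.getD, List.getElem?_eq_getElem hi]
    · have hih := ih i (by simp [List.count_cons, hc] at h ⊢; omega)
      obtain ⟨p, ps, hp⟩ : ∃ p ps, splitQ rest = p :: ps := by
        cases hsp : splitQ rest with
        | nil => exact absurd hsp (splitQ_ne_nil rest)
        | cons p ps => exact ⟨p, ps, rfl⟩
      rw [hp] at hih
      have hsq : splitQ (c :: rest) = (c :: p) :: ps := by simp [splitQ, hc, hp]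
      rw [hsq, weave_cons_head, hih]
      simp [fillT, hc]

theorem foldA_inv (ts : List Char) (rest : List Char) :
    ∀ (done : List Char) (ti : Nat), ti + rest.count '?' ≤ ts.length →
    (PySem.List.enumerate rest (done.length : Int)).foldl (stepA ts)
        ((ti : Int), done ++ rest) =
      (((ti + rest.count '?' : Nat) : Int), done ++ fillT ts rest ti) := by
  induction rest with
  | nil => intro done ti h; simp [fillT]
  | cons c rest ih =>
    intro done ti h
    rw [PySem.List.enumerate_cons]
    by_cases hc : c = '?'
    · subst hc
      have hi : ti < ts.length := by simp [List.count_cons] at h; omega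
      have hget : PySem.List.pyGet? ts (ti : Int) = some ts[ti] := by
        rw [PySem.List.pyGet?_natCast]
        exact List.getElem?_eq_getElem hi
      have hslice1 : PySem.List.slice (done ++ '?' :: rest) none (some (done.length : Int))
          = done := by
        rw [PySem.List.slice_to_natCast]
        exact List.take_left ..
      have hslice2 : PySem.List.slice (done ++ '?' :: rest) (some ((done.length : Int) + 1)) none
          = rest := by
        have h1 : ((done.length : Int) + 1) = ((done.length + 1 : Nat) : Int) := by push_cast; ring
        rw [h1, PySem.List.slice_from_natCast]
        have h2 : done ++ '?' :: rest = (done ++ ['?']) ++ rest := by simp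
        have h3 : done.length + 1 = (done ++ ['?']).length := by simp
        rw [h2, h3]
        exact List.drop_left ..
      have hstep : stepA ts ((ti : Int), done ++ '?' :: rest) ((done.length : Int), '?')
          = (((ti : Int) + 1), done ++ [ts[ti]] ++ rest) := by
        simp [stepA, hget, hslice1, hslice2]
      rw [List.foldl_cons, hstep]
      have hcast : ((ti : Int) + 1) = ((ti + 1 : Nat) : Int) := by push_cast; ring
      have hlen : (done.length : Int) + 1 = (((done ++ [ts[ti]]).length : Nat) : Int) := by
        simp
      have harr : done ++ [ts[ti]] ++ rest = (done ++ [ts[ti]]) ++ rest := by simp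
      rw [hcast, hlen, harr,
        ih (done ++ [ts[ti]]) (ti + 1) (by simp [List.count_cons] at h; omega)]
      simp only [Prod.mk.injEq]
      constructor
      · simp [List.count_cons]; push_cast; ring
      · simp [fillT, List.getD, List.getElem?_eq_getElem hi]
    · have hstep : stepA ts ((ti : Int), done ++ c :: rest) ((done.length : Int), c)
          = ((ti : Int), done ++ c :: rest) := by
        simp [stepA, hc]
      rw [List.foldl_cons, hstep]
      have h2 : done ++ c :: rest = (done ++ [c]) ++ rest := by simp
      have hlen : (done.length : Int) + 1 = (((done ++ [c]).length : Nat) : Int) := by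
        simp
      rw [h2, hlen, ih (done ++ [c]) ti (by simp [List.count_cons, hc] at h ⊢; omega)]
      simp only [Prod.mk.injEq]
      constructor
      · simp [List.count_cons, hc]
      · simp [fillT, hc]

theorem inner_eq (cr ts : List Char) (h : cr.count '?' ≤ ts.length) :
    ((PySem.List.enumerate cr 0).foldl (stepA ts) (0, cr)).2
      = weave ts 0 (splitQ cr) := by
  have hA := foldA_inv ts cr [] 0 (by omega)
  simp only [List.nil_append, List.length_nil, Nat.cast_zero] at hA
  rw [hA, weave_splitQ ts cr 0 (by omega)]

theorem foldl_append_map {α β : Type} (f : α → β) (l : List α) (acc : List β) :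
    l.foldl (fun a x => a ++ [f x]) acc = acc ++ l.map f := by
  induction l generalizing acc with
  | nil => simp
  | cons x xs ih => simp [ih]

-- ===== VERDICT (by name: the statement is the Claim_ definition above) =====
theorem make_full_strings_spec : Claim_equal_make_full_strings := by
  intro cr tl _ hpre
  unfold Spec_make_full_strings make_full_strings make_full_strings_alt
  rw [foldl_append_map]
  simp only [List.nil_append]
  apply List.map_congr_left
  intro ts hts
  rw [inner_eq cr.toList ts.toList (hpre ts hts)]
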